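-- pv_equiv track=rewrite | github.com/UCSB-NLP-Chang/TextGrad | src/attack/text_grad.py | get_subtoken_mask
-- ===== SOURCE A (Python) =====
-- from typing import List
--
-- def get_subtoken_mask(subword_list: List[str]):
--     orig_mask = [1 for _ in subword_list]
--     for idx in range(len(subword_list)):
--         if subword_list[idx].startswith("##"):
--             orig_mask[idx] = 0
--             if idx > 0 and orig_mask[idx - 1] == 1:
--                 orig_mask[idx - 1] = 0
--     return orig_mask
-- ===== SOURCE B (Python) =====
-- from typing import List
--
-- def get_subtoken_mask(subword_list: List[str]):
--     n = len(subword_list)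
--     return [0 if subword_list[i].startswith("##") or (i + 1 < n and subword_list[i + 1].startswith("##")) else 1
--             for i in range(n)]
-- ===== Notes on version B (the rewrite author's own statement) =====
-- stated objective: simpler
-- what changed: Replaces A's stateful loop that writes 0 backward into orig_mask[idx-1] (with a redundant ==1 guard) by a single pure lookahead comprehension: position i is 0 iff token i or its successor starts with '##'.
import Mathlib
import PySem

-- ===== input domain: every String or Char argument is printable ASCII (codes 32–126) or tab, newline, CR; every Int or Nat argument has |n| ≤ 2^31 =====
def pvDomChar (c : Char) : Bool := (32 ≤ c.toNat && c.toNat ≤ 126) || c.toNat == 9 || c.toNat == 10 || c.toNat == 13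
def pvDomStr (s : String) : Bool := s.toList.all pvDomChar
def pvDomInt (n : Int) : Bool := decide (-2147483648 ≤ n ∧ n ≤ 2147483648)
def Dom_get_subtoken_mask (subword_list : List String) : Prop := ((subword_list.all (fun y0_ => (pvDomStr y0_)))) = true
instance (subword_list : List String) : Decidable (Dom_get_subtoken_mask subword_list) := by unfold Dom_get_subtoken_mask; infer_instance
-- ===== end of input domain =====

-- B replaces A's backward-writing loop (mask[idx-1] := 0) by a single lookahead
-- comprehension: position i is 0 iff token i or its successor is a '##' subtoken. Objective: simpler.

-- ===== PORT A =====
def get_subtoken_mask (subword_list : List String) : List Int :=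
  let orig_mask := subword_list.map (fun _ => (1 : Int))
  (PySem.List.pyRange 0 (subword_list.length : Int) 1).foldl
    (fun mask idx =>
      if PySem.Str.startswith (PySem.List.pyGetD subword_list idx "") "##" then
        let mask1 := PySem.List.pySetD mask idx 0
        if idx > 0 && (PySem.List.pyGetD mask1 (idx - 1) 0 == 1) then
          PySem.List.pySetD mask1 (idx - 1) 0
        else mask1
      else mask)
    orig_mask

-- ===== PORT B =====
def get_subtoken_mask_alt (subword_list : List String) : List Int :=
  (PySem.List.pyRange 0 (subword_list.length : Int) 1).map (fun i =>
    if PySem.Str.startswith (PySem.List.pyGetD subword_list i "") "##" ||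
       (decide (i + 1 < (subword_list.length : Int)) &&
        PySem.Str.startswith (PySem.List.pyGetD subword_list (i + 1) "") "##")
    then (0 : Int) else 1)

-- ===== PRECONDITION & SPEC =====
def Spec_get_subtoken_mask (subword_list : List String) (out : List Int) : Prop := out = get_subtoken_mask_alt subword_list
instance (subword_list : List String) (out : List Int) : Decidable (Spec_get_subtoken_mask subword_list out) := by unfold Spec_get_subtoken_mask; infer_instance

-- ===== CLAIM (what is proved, stated in full; the proofs are below) =====
def Claim_equal_get_subtoken_mask : Prop := ∀ (subword_list : List String), Dom_get_subtoken_mask subword_list → Spec_get_subtoken_mask subword_list (get_subtoken_mask subword_list)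

-- ===== LEMMAS AND PROOFS =====

-- `st s j` : token j (out of range: "") starts with "##"
def pvSt (s : List String) (j : Nat) : Bool :=
  PySem.Str.startswith (s.getD j "") "##"

-- value of A's mask cell i after the first k loop iterations
def pvVal (s : List String) (k i : Nat) : Int :=
  if (i < k ∧ pvSt s i = true) ∨ (i + 1 < k ∧ pvSt s (i + 1) = true) then 0 else 1

-- one iteration of A's loop body
def pvStep (s : List String) (mask : List Int) (idx : Int) : List Int :=
  if PySem.Str.startswith (PySem.List.pyGetD s idx "") "##" then
    let mask1 := PySem.List.pySetD mask idx 0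
    if idx > 0 && (PySem.List.pyGetD mask1 (idx - 1) 0 == 1) then
      PySem.List.pySetD mask1 (idx - 1) 0
    else mask1
  else mask

theorem pvVal_zero (s : List String) (i : Nat) : pvVal s 0 i = 1 := by
  simp [pvVal]

theorem pvMask_getD (s : List String) (k j : Nat) (hj : j < s.length) :
    ((List.range s.length).map (pvVal s k)).getD j 0 = pvVal s k j := by
  rw [List.getD_eq_getElem _ _ (by simpa using hj)]
  simp

theorem pvStep_eq (s : List String) (k : Nat) (hk : k < s.length) :
    pvStep s ((List.range s.length).map (pvVal s k)) (k : Int)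
      = (List.range s.length).map (pvVal s (k + 1)) := by
  unfold pvStep
  have hget : PySem.List.pyGetD s (k : Int) "" = s.getD k "" := by
    simp [PySem.List.pyGetD_natCast]
  rw [hget]
  have hst : PySem.Str.startswith (s.getD k "") "##" = pvSt s k := rfl
  rw [hst]
  by_cases hk0 : pvSt s k = true
  · simp only [hk0, if_true]
    -- the inner guard: mask1[k-1] = 1 ↔ k-1 was not itself a subtoken
    by_cases hkpos : 0 < k
    · have hcast : ((k : Int) - 1) = ((k - 1 : Nat) : Int) := by omega
      have hguard : PySem.List.pyGetD
          (PySem.List.pySetD ((List.range s.length).map (pvVal s k)) (k : Int) 0)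
          ((k : Int) - 1) 0 = pvVal s k (k - 1) := by
        rw [hcast, PySem.List.pyGetD_pySetD_natCast _ k (k - 1) 0 0 (by simpa using hk)]
        rw [if_neg (by omega)]
        rw [PySem.List.pyGetD_natCast]
        exact pvMask_getD s k (k - 1) (by omega)
      rw [hguard, PySem.List.pySetD_natCast, hcast, PySem.List.pySetD_natCast]
      have hvk1 : pvVal s k (k - 1) = (if pvSt s (k - 1) = true then 0 else 1) := by
        unfold pvVal
        by_cases h : pvSt s (k - 1) = true
        · rw [if_pos h, if_pos (Or.inl ⟨by omega, h⟩)]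
        · rw [if_neg h, if_neg]
          rintro (⟨_, h1⟩ | ⟨h2, _⟩)
          · exact h h1
          · omega
      by_cases hprev : pvSt s (k - 1) = true
      · -- previous cell already 0: guard is false, only cell k is set
        rw [hvk1, if_pos hprev]
        have : ((k : Int) > 0 && ((0 : Int) == 1)) = false := by simp
        rw [this, if_neg (by simp)]
        apply List.ext_getElem (by simp)
        intro i hi _
        simp only [List.getElem_set, List.getElem_map, List.getElem_range] at hi ⊢
        by_cases hik : i = k
        · subst hik
          rw [if_pos rfl]
          unfold pvVal
          rw [if_pos (Or.inl ⟨by omega, hk0⟩)]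
        · rw [if_neg (fun h => hik h.symm)]
          unfold pvVal
          apply if_congr _ rfl rfl
          constructor
          · rintro (⟨h1, h2⟩ | ⟨h1, h2⟩)
            · exact Or.inl ⟨by omega, h2⟩
            · exact Or.inr ⟨by omega, h2⟩
          · rintro (⟨h1, h2⟩ | ⟨h1, h2⟩)
            · exact Or.inl ⟨by omega, h2⟩
            · rcases Nat.lt_or_ge (i + 1) k with h | h
              · exact Or.inr ⟨h, h2⟩
              · have hik1 : i = k - 1 := by omega
                exact Or.inl ⟨by omega, by rwa [hik1]⟩
      · -- previous cell is 1: guard fires, cells k and k-1 are both set to 0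
        rw [hvk1, if_neg hprev]
        have : ((k : Int) > 0 && ((1 : Int) == 1)) = true := by
          simp; omega
        rw [this, if_pos (by simp)]
        apply List.ext_getElem (by simp)
        intro i hi _
        simp only [List.getElem_set, List.getElem_map, List.getElem_range,
          List.length_set] at hi ⊢
        by_cases hik1 : i = k - 1
        · subst hik1
          rw [if_pos rfl]
          unfold pvVal
          rw [if_pos (Or.inr ⟨by omega, by rwa [Nat.sub_add_cancel hkpos]⟩)]
        · rw [if_neg (fun h => hik1 h.symm)]
          by_cases hik : i = k
          · subst hik
            rw [if_pos rfl]
            unfold pvVal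
            rw [if_pos (Or.inl ⟨by omega, hk0⟩)]
          · rw [if_neg (fun h => hik h.symm)]
            unfold pvVal
            apply if_congr _ rfl rfl
            constructor
            · rintro (⟨h1, h2⟩ | ⟨h1, h2⟩)
              · exact Or.inl ⟨by omega, h2⟩
              · exact Or.inr ⟨by omega, h2⟩
            · rintro (⟨h1, h2⟩ | ⟨h1, h2⟩)
              · exact Or.inl ⟨by omega, h2⟩
              · exact Or.inr ⟨by omega, h2⟩
    · -- k = 0: guard is false (idx > 0 fails)
      have hk00 : k = 0 := by omega
      subst hk00
      have : ((0 : Int) > 0 &&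
          (PySem.List.pyGetD (PySem.List.pySetD ((List.range s.length).map (pvVal s 0)) (0 : Int) 0)
            ((0 : Int) - 1) 0 == 1)) = false := by simp
      rw [show ((0 : Nat) : Int) = (0 : Int) from rfl] at *
      rw [this, if_neg (by simp)]
      rw [show ((0 : Int)) = ((0 : Nat) : Int) from rfl, PySem.List.pySetD_natCast]
      apply List.ext_getElem (by simp)
      intro i hi _
      simp only [List.getElem_set, List.getElem_map, List.getElem_range] at hi ⊢
      by_cases hik : i = 0
      · subst hik
        rw [if_pos rfl]
        unfold pvVal
        rw [if_pos (Or.inl ⟨by omega, hk0⟩)]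
        simp
      · rw [if_neg (fun h => hik h.symm)]
        unfold pvVal
        rw [if_neg (by rintro (⟨h1, _⟩ | ⟨h1, _⟩) <;> omega),
            if_neg (by rintro (⟨h1, _⟩ | ⟨h1, _⟩) <;> omega)]
  · -- token k is not a subtoken: mask unchanged
    rw [if_neg hk0]
    apply List.map_congr_left
    intro i hi
    have hi' : i < s.length := List.mem_range.mp hi
    unfold pvVal
    apply if_congr _ rfl rfl
    constructor
    · rintro (⟨h1, h2⟩ | ⟨h1, h2⟩)
      · exact Or.inl ⟨by omega, h2⟩
      · exact Or.inr ⟨by omega, h2⟩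
    · rintro (⟨h1, h2⟩ | ⟨h1, h2⟩)
      · left
        refine ⟨?_, h2⟩
        by_contra hcon
        have hik : i = k := by omega
        rw [hik] at h2
        exact hk0 h2
      · right
        refine ⟨?_, h2⟩
        by_contra hcon
        have hik : i + 1 = k := by omega
        rw [hik] at h2
        exact hk0 h2

theorem pvLoop_invariant (s : List String) (k : Nat) (hk : k ≤ s.length) :
    (List.range k).foldl (fun mask (j : Nat) => pvStep s mask (j : Int))
        (s.map (fun _ => (1 : Int)))
      = (List.range s.length).map (pvVal s k) := by
  induction k with
  | zero =>
    simp only [List.range_zero, List.foldl_nil]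
    apply List.ext_getElem (by simp)
    intro i hi hi'
    simp [pvVal_zero]
  | succ m ih =>
    rw [List.range_succ, List.foldl_append, ih (by omega), List.foldl_cons, List.foldl_nil]
    exact pvStep_eq s m (by omega)

-- ===== VERDICT (by name: the statement is the Claim_ definition above) =====
theorem get_subtoken_mask_spec : Claim_equal_get_subtoken_mask := by
  intro s _
  show get_subtoken_mask s = get_subtoken_mask_alt s
  have hA : get_subtoken_mask s = (List.range s.length).map (pvVal s s.length) := by
    have h := pvLoop_invariant s s.length le_rfl
    unfold get_subtoken_mask
    rw [PySem.List.pyRange_zero_natCast, List.foldl_map]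
    exact h
  rw [hA]
  unfold get_subtoken_mask_alt
  rw [PySem.List.pyRange_zero_natCast, List.map_map]
  apply List.map_congr_left
  intro i hi
  have hi' : i < s.length := List.mem_range.mp hi
  show pvVal s s.length i = _
  have h1 : PySem.List.pyGetD s ((i : Int)) "" = s.getD i "" :=
    PySem.List.pyGetD_natCast s i ""
  have h2 : PySem.List.pyGetD s ((i : Int) + 1) "" = s.getD (i + 1) "" := by
    rw [show ((i : Int) + 1) = ((i + 1 : Nat) : Int) by push_cast; ring,
        PySem.List.pyGetD_natCast]
  simp only [Function.comp_apply]
  rw [h1, h2]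
  unfold pvVal pvSt
  by_cases ha : PySem.Str.startswith (s.getD i "") "##" = true
  · rw [if_pos (Or.inl ⟨hi', ha⟩), ha, Bool.true_or]
    rfl
  · have ha' : PySem.Str.startswith (s.getD i "") "##" = false := by
      rwa [Bool.not_eq_true] at ha
    by_cases hb : (i + 1 < s.length) ∧ PySem.Str.startswith (s.getD (i + 1) "") "##" = true
    · have hd : (decide ((i : Int) + 1 < (s.length : Int))) = true := by
        simp
        omega
      rw [if_pos (Or.inr hb), ha', Bool.false_or, hd, hb.2, Bool.true_and]
      rfl
    · rw [if_neg (by rintro (⟨_, h⟩ | ⟨hx1, hx2⟩); exact ha h; exact hb ⟨hx1, hx2⟩)]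
      rcases Classical.em (i + 1 < s.length) with h | h
      · have hb2 : PySem.Str.startswith (s.getD (i + 1) "") "##" = false := by
          rcases Bool.eq_false_or_eq_true (PySem.Str.startswith (s.getD (i + 1) "") "##") with hh | hh
          · exact absurd ⟨h, hh⟩ hb
          · exact hh
        rw [ha', Bool.false_or, hb2, Bool.and_false]
        rfl
      · have hd : (decide ((i : Int) + 1 < (s.length : Int))) = false := by
          simp
          omega
        rw [ha', Bool.false_or, hd, Bool.false_and]
        rfl
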